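-- pv_equiv track=rewrite | github.com/esmini/esmini | test/performance_test.py | remove_identical_shared_prefixes_suffixes
-- ===== SOURCE A (Python) =====
-- def remove_identical_shared_prefixes_suffixes(strings):
--     min_prefix_len = min(len(s) for s in strings)
--     min_suffix_len = min(len(s) for s in strings)
--
--     # Find the longest shared prefix length
--     prefix_len = 0
--     for i in range(1, min_prefix_len + 1):
--         prefix = strings[0][:i]
--         if all(s.startswith(prefix) for s in strings):
--             prefix_len = i
--         else:
--             break
--
--     # Find the longest shared suffix length
--     suffix_len = 0
--     for i in range(1, min_suffix_len + 1):
--         suffix = strings[0][-i:]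
--         if all(s.endswith(suffix) for s in strings):
--             suffix_len = i
--         else:
--             break
--
--     # Remove the shared prefixes and suffixes
--     result = [s[prefix_len:len(s) - suffix_len] for s in strings]
--     return result
-- ===== SOURCE B (Python) =====
-- def _lcp(a, b):
--     # longest common prefix of two strings
--     n = min(len(a), len(b))
--     i = 0
--     while i < n and a[i] == b[i]:
--         i += 1
--     return a[:i]
--
--
-- def remove_identical_shared_prefixes_suffixes(strings):
--     pre = strings[0]
--     suf = strings[0][::-1]
--     for s in strings[1:]:
--         pre = _lcp(pre, s)
--         suf = _lcp(suf, s[::-1])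
--     p, q = len(pre), len(suf)
--     return [s[p:len(s) - q] for s in strings]
-- ===== Notes on version B (the rewrite author's own statement) =====
-- stated objective: alternative
-- what changed: A grows a candidate prefix/suffix length 1,2,3,... and at each length re-scans every string with startswith/endswith; B instead makes one left fold over the list, shrinking a pairwise longest-common-prefix (and the same fold over reversed strings for the suffix), so the per-candidate-length all-strings scans disappear.
import Mathlib
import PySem

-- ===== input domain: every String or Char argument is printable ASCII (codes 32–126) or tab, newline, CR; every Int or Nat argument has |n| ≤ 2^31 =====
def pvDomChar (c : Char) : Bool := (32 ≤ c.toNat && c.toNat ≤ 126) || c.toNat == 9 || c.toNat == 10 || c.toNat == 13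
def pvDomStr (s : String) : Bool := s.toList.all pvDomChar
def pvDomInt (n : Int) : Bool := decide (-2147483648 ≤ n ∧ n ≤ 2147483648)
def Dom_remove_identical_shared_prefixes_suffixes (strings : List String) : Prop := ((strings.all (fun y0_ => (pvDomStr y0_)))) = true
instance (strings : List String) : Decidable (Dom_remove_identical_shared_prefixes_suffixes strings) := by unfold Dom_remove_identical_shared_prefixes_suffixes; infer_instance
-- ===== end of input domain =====

-- B replaces A's grow-the-candidate-length loops (each length re-scanning every string with
-- startswith/endswith) by a single fold of a pairwise longest-common-prefix over the strings
-- (and over their reverses for the suffix): objective 'alternative' (different algorithm, same cost).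

-- ===== PORT A =====
-- Python min() over a nonempty list of naturals (left fold; [] raises ValueError, excluded by Pre_)
def pyMinNat : List Nat → Nat
  | [] => 0
  | x :: xs => xs.foldl Nat.min x

-- 'for i in range(1, m+1): if P i: acc = i else: break' with acc starting at 0;
-- the iteration list is List.range' 1 m = [1, …, m] (exact: range(1, m+1) over naturals)
def pyForBreak (P : Nat → Bool) : List Nat → Nat → Nat
  | [], acc => acc
  | i :: rest, acc => if P i then pyForBreak P rest i else acc

def remove_identical_shared_prefixes_suffixes (strings : List String) : List String :=
  match strings with
  | [] => []   -- Python: min() of empty generator raises ValueError; excluded by Pre_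
  | s0 :: _ =>
    let min_prefix_len := pyMinNat (strings.map (fun s => s.toList.length))
    let min_suffix_len := pyMinNat (strings.map (fun s => s.toList.length))
    let prefix_len := pyForBreak
      (fun i => strings.all (fun s =>
        PySem.Chars.startswith s.toList (PySem.List.slice s0.toList none (some (i : Int)))))
      (List.range' 1 min_prefix_len) 0
    let suffix_len := pyForBreak
      (fun i => strings.all (fun s =>
        PySem.Chars.endswith s.toList (PySem.List.slice s0.toList (some (-(i : Int))) none)))
      (List.range' 1 min_suffix_len) 0
    strings.map (fun s => String.ofList (PySem.List.slice s.toList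
      (some (prefix_len : Int)) (some ((s.toList.length : Int) - (suffix_len : Int)))))

-- ===== PORT B =====
-- _lcp: the while loop stops at the first mismatching position and returns a[:i];
-- as structural recursion that is: keep the head while both heads exist and agree.
def lcpChars : List Char → List Char → List Char
  | a :: as_, b :: bs => if a = b then a :: lcpChars as_ bs else []
  | _, _ => []

def remove_identical_shared_prefixes_suffixes_alt (strings : List String) : List String :=
  match strings with
  | [] => []   -- Python B: strings[0] raises IndexError; excluded by Pre_
  | s0 :: rest =>
    let pre := rest.foldl (fun p s => lcpChars p s.toList) s0.toList
    let suf := rest.foldl (fun p s => lcpChars p s.toList.reverse) s0.toList.reverse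
    let p := pre.length
    let q := suf.length
    strings.map (fun s => String.ofList (PySem.List.slice s.toList
      (some (p : Int)) (some ((s.toList.length : Int) - (q : Int)))))

-- ===== PRECONDITION & SPEC =====
-- Pre_: A raises ValueError (min of an empty sequence) on the empty list; everywhere else A returns.
def Pre_remove_identical_shared_prefixes_suffixes (strings : List String) : Prop := strings ≠ []
instance (strings : List String) : Decidable (Pre_remove_identical_shared_prefixes_suffixes strings) := by unfold Pre_remove_identical_shared_prefixes_suffixes; infer_instance
def pvWitness_remove_identical_shared_prefixes_suffixes : List String := ["xaby", "xcy"]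

def Spec_remove_identical_shared_prefixes_suffixes (strings : List String) (out : List String) : Prop := out = remove_identical_shared_prefixes_suffixes_alt strings
instance (strings : List String) (out : List String) : Decidable (Spec_remove_identical_shared_prefixes_suffixes strings out) := by unfold Spec_remove_identical_shared_prefixes_suffixes; infer_instance

-- ===== CLAIM (what is proved, stated in full; the proofs are below) =====
def Claim_equal_remove_identical_shared_prefixes_suffixes : Prop := ∀ (strings : List String), Dom_remove_identical_shared_prefixes_suffixes strings → Pre_remove_identical_shared_prefixes_suffixes strings → Spec_remove_identical_shared_prefixes_suffixes strings (remove_identical_shared_prefixes_suffixes strings)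

-- ===== LEMMAS AND PROOFS =====

theorem lcp_prefix_left (a b : List Char) : lcpChars a b <+: a := by
  induction a generalizing b with
  | nil => cases b <;> simp [lcpChars]
  | cons x as ih =>
    cases b with
    | nil => simp [lcpChars]
    | cons y bs =>
      simp only [lcpChars]
      split
      · simpa [List.cons_prefix_cons] using ih bs
      · simp

theorem lcp_length_iff (a b : List Char) (k : Nat) :
    k ≤ (lcpChars a b).length ↔ k ≤ a.length ∧ a.take k <+: b := by
  induction a generalizing b k with
  | nil =>
    cases b <;> simp [lcpChars]
  | cons x as ih =>
    cases b with
    | nil =>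
      simp only [lcpChars]
      cases k with
      | zero => simp
      | succ k => simp [List.take]
    | cons y bs =>
      simp only [lcpChars]
      by_cases hxy : x = y
      · subst hxy
        rw [if_pos rfl]
        cases k with
        | zero => simp
        | succ k =>
          simp only [List.length_cons, Nat.succ_le_succ_iff, List.take,
            List.cons_prefix_cons, true_and]
          exact ih bs k
      · simp only [if_neg hxy]
        cases k with
        | zero => simp
        | succ k =>
          simp only [List.length, Nat.succ_le_succ_iff, List.take, List.cons_prefix_cons]
          constructor
          · omega
          · rintro ⟨-, h, -⟩; exact absurd h hxy

theorem foldl_lcp_prefix (a : List Char) (l : List (List Char)) :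
    l.foldl lcpChars a <+: a := by
  induction l generalizing a with
  | nil => simp
  | cons b l ih => exact (ih (lcpChars a b)).trans (lcp_prefix_left a b)

theorem foldl_lcp_length_iff (a : List Char) (l : List (List Char)) (k : Nat) :
    k ≤ (l.foldl lcpChars a).length ↔ k ≤ a.length ∧ ∀ b ∈ l, a.take k <+: b := by
  induction l generalizing a with
  | nil => simp
  | cons b l ih =>
    simp only [List.foldl_cons, List.mem_cons]
    rw [ih]
    constructor
    · rintro ⟨h1, h2⟩
      have h3 := (lcp_length_iff a b k).mp h1
      refine ⟨h3.1, fun c hc => ?_⟩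
      rcases hc with rfl | hc
      · exact h3.2
      · have heq : (lcpChars a b).take k = a.take k := by
          rw [List.prefix_iff_eq_take.mp (lcp_prefix_left a b), List.take_take,
            Nat.min_eq_left h1]
        rw [← heq]; exact h2 c hc
    · rintro ⟨h1, h2⟩
      have hk : k ≤ (lcpChars a b).length :=
        (lcp_length_iff a b k).mpr ⟨h1, h2 b (Or.inl rfl)⟩
      have heq : (lcpChars a b).take k = a.take k := by
        rw [List.prefix_iff_eq_take.mp (lcp_prefix_left a b), List.take_take,
          Nat.min_eq_left hk]
      refine ⟨hk, fun c hc => ?_⟩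
      rw [heq]; exact h2 c (Or.inr hc)

theorem foldl_min_iff (a : Nat) (l : List Nat) (k : Nat) :
    k ≤ l.foldl Nat.min a ↔ k ≤ a ∧ ∀ x ∈ l, k ≤ x := by
  induction l generalizing a with
  | nil => simp
  | cons b l ih =>
    simp only [List.foldl_cons, List.mem_cons]
    rw [ih]
    constructor
    · rintro ⟨h1, h2⟩
      exact ⟨le_trans h1 (Nat.min_le_left _ _), fun x hx => by
        rcases hx with rfl | hx
        · exact le_trans h1 (Nat.min_le_right _ _)
        · exact h2 x hx⟩
    · rintro ⟨h1, h2⟩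
      exact ⟨le_min h1 (h2 b (Or.inl rfl)), fun x hx => h2 x (Or.inr hx)⟩

-- the for/break loop over [s, …, s+k-1] with acc = s-1, when P is a down-set cut at N below s+k
theorem pyForBreak_range' (P : Nat → Bool) (N : Nat) :
    ∀ (k s : Nat), 1 ≤ s →
    (∀ i, s ≤ i → i < s + k → (P i = true ↔ i ≤ N)) →
    pyForBreak P (List.range' s k) (s - 1) = if s ≤ N then min N (s + k - 1) else s - 1 := by
  intro k
  induction k with
  | zero =>
    intro s hs _
    simp only [List.range'_zero, pyForBreak]
    split <;> omega
  | succ k ih =>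
    intro s hs hP
    rw [List.range'_succ]
    simp only [pyForBreak]
    by_cases hps : P s = true
    · have hsN : s ≤ N := (hP s le_rfl (by omega)).mp hps
      rw [if_pos hps]
      have h2 := ih (s + 1) (by omega) (fun i h1 h2 => hP i (by omega) (by omega))
      simp only [Nat.add_sub_cancel] at h2
      rw [h2, if_pos hsN]
      split <;> omega
    · have hsN : ¬ s ≤ N := fun h => hps ((hP s le_rfl (by omega)).mpr h)
      rw [if_neg hps, if_neg hsN]

theorem reverse_drop_eq_take_reverse (l : List Char) (i : Nat) (h : i ≤ l.length) :
    (l.drop (l.length - i)).reverse = l.reverse.take i := by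
  rw [List.reverse_drop]
  congr 1
  omega

theorem remove_identical_shared_prefixes_suffixes_spec' (strings : List String)
    (hne : strings ≠ []) :
    remove_identical_shared_prefixes_suffixes strings
      = remove_identical_shared_prefixes_suffixes_alt strings := by
  match strings with
  | [] => exact absurd rfl hne
  | s0 :: rest =>
    simp only [remove_identical_shared_prefixes_suffixes,
      remove_identical_shared_prefixes_suffixes_alt]
    -- abbreviations
    set a := s0.toList with ha
    set m := pyMinNat ((s0 :: rest).map (fun s => s.toList.length)) with hm
    set N := (rest.foldl (fun p s => lcpChars p s.toList) a).length with hN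
    set N' := (rest.foldl (fun p s => lcpChars p s.toList.reverse) a.reverse).length with hN'
    have hfold : rest.foldl (fun p s => lcpChars p s.toList) a
        = (rest.map String.toList).foldl lcpChars a := by
      rw [List.foldl_map]
    have hfold' : rest.foldl (fun p s => lcpChars p s.toList.reverse) a.reverse
        = (rest.map (fun s => s.toList.reverse)).foldl lcpChars a.reverse := by
      rw [List.foldl_map]
    -- characterize m
    have hm_iff : ∀ k, k ≤ m ↔ k ≤ a.length ∧ ∀ s ∈ rest, k ≤ s.toList.length := by
      intro k
      rw [hm]
      simp only [List.map_cons, pyMinNat, foldl_min_iff]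
      constructor
      · rintro ⟨h1, h2⟩
        exact ⟨h1, fun s hs => h2 _ (List.mem_map_of_mem hs)⟩
      · rintro ⟨h1, h2⟩
        refine ⟨h1, fun x hx => ?_⟩
        obtain ⟨s, hs, rfl⟩ := List.mem_map.mp hx
        exact h2 s hs
    -- N ≤ m and N' ≤ m
    have hNa : N ≤ a.length := by
      rw [hN, hfold]; exact ((foldl_lcp_prefix a _).length_le)
    have hNm : N ≤ m := by
      rw [hm_iff]
      refine ⟨hNa, fun s hs => ?_⟩
      have := (foldl_lcp_length_iff a (rest.map String.toList) N).mp
        (by rw [hN, hfold])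
      have hp := this.2 s.toList (List.mem_map_of_mem hs)
      have := hp.length_le
      rwa [List.length_take, Nat.min_eq_left hNa] at this
    have hN'a : N' ≤ a.length := by
      have := (foldl_lcp_prefix a.reverse ((rest.map (fun s => s.toList.reverse)))).length_le
      rw [hN', hfold']
      simpa using this
    have hN'm : N' ≤ m := by
      rw [hm_iff]
      refine ⟨hN'a, fun s hs => ?_⟩
      have hlen : N' ≤ a.reverse.length := by simpa using hN'a
      have := (foldl_lcp_length_iff a.reverse (rest.map (fun s => s.toList.reverse)) N').mp
        (by rw [hN', hfold'])
      have hp := this.2 s.toList.reverse (List.mem_map_of_mem hs)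
      have hl := hp.length_le
      simp only [List.length_take, List.length_reverse] at hl hlen
      omega
    -- prefix predicate cut
    have hPpre : ∀ i, 1 ≤ i → i < 1 + m →
        (((s0 :: rest).all (fun s =>
          PySem.Chars.startswith s.toList (PySem.List.slice a none (some (i : Int))))) = true
          ↔ i ≤ N) := by
      intro i _ him
      have him' : i ≤ m := by omega
      have hia : i ≤ a.length := ((hm_iff i).mp him').1
      rw [hN, hfold, foldl_lcp_length_iff]
      simp only [List.all_cons, List.all_eq_true, Bool.and_eq_true,
        PySem.Chars.startswith_iff, PySem.List.slice_to_natCast]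
      constructor
      · rintro ⟨-, h2⟩
        exact ⟨hia, fun b hb => by
          obtain ⟨s, hs, rfl⟩ := List.mem_map.mp hb
          exact h2 s hs⟩
      · rintro ⟨-, h2⟩
        exact ⟨List.take_prefix _ _, fun s hs => h2 s.toList (List.mem_map_of_mem hs)⟩
    -- suffix predicate cut
    have hPsuf : ∀ i, 1 ≤ i → i < 1 + m →
        (((s0 :: rest).all (fun s =>
          PySem.Chars.endswith s.toList (PySem.List.slice a (some (-(i : Int))) none))) = true
          ↔ i ≤ N') := by
      intro i hi him
      have him' : i ≤ m := by omega
      have hia : i ≤ a.length := ((hm_iff i).mp him').1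
      rw [PySem.List.slice_from_neg_natCast a i (by omega)]
      rw [hN', hfold', foldl_lcp_length_iff]
      have hsl : ∀ s : List Char, (a.drop (a.length - i) <:+ s)
          ↔ a.reverse.take i <+: s.reverse := by
        intro s
        rw [← reverse_drop_eq_take_reverse a i hia, List.reverse_prefix]
      simp only [List.all_cons, List.all_eq_true, Bool.and_eq_true,
        PySem.Chars.endswith_iff]
      constructor
      · rintro ⟨-, h2⟩
        refine ⟨by simpa using hia, fun b hb => ?_⟩
        obtain ⟨s, hs, rfl⟩ := List.mem_map.mp hb
        exact (hsl s.toList).mp (h2 s hs)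
      · rintro ⟨-, h2⟩
        refine ⟨List.drop_suffix _ _, fun s hs => ?_⟩
        exact (hsl s.toList).mpr (h2 s.toList.reverse (List.mem_map_of_mem hs))
    -- evaluate the two loops
    have hpre : pyForBreak
        (fun i => (s0 :: rest).all (fun s =>
          PySem.Chars.startswith s.toList (PySem.List.slice a none (some (i : Int)))))
        (List.range' 1 m) 0 = N := by
      have := pyForBreak_range'
        (fun i => (s0 :: rest).all (fun s =>
          PySem.Chars.startswith s.toList (PySem.List.slice a none (some (i : Int)))))
        N m 1 le_rfl hPpre
      rw [show (1 : Nat) - 1 = 0 from rfl] at this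
      rw [this]
      split <;> omega
    have hsuf : pyForBreak
        (fun i => (s0 :: rest).all (fun s =>
          PySem.Chars.endswith s.toList (PySem.List.slice a (some (-(i : Int))) none)))
        (List.range' 1 m) 0 = N' := by
      have := pyForBreak_range'
        (fun i => (s0 :: rest).all (fun s =>
          PySem.Chars.endswith s.toList (PySem.List.slice a (some (-(i : Int))) none)))
        N' m 1 le_rfl hPsuf
      rw [show (1 : Nat) - 1 = 0 from rfl] at this
      rw [this]
      split <;> omega
    simp only [hpre, hsuf]

-- ===== VERDICT (by name: the statement is the Claim_ definition above) =====
theorem remove_identical_shared_prefixes_suffixes_spec : Claim_equal_remove_identical_shared_prefixes_suffixes := by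
  intro strings _ hpre
  unfold Spec_remove_identical_shared_prefixes_suffixes
  exact remove_identical_shared_prefixes_suffixes_spec' strings hpre
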